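-- pv_equiv track=rewrite | github.com/MMohsinM/Hate-Speech-on-Twitter-A-Pragmatic-Approach-to-Collect-Hateful-and-Offensive-Expressions-and-Perfor | feat_extract.py | class_list
-- ===== SOURCE A (Python) =====
-- def class_list(thres_freq, tags):
--     hate = {}
--     offn = {}
--     clean = {}
--     for key in thres_freq:
--         if key[1] in tags:
--             if key[2] =='clean':
--                 clean[key[0]] = thres_freq[key]
--             elif key[2] =='offn':
--                 offn[key[0]] = thres_freq[key]
--             elif key[2] =='hate':
--                 hate[key[0]] = thres_freq[key]
--     return {'hate':hate,'offn':offn,'clean':clean}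
-- ===== SOURCE B (Python) =====
-- def class_list(thres_freq, tags):
--     kept = [key for key in thres_freq if key[1] in tags]
--     return {cat: {key[0]: thres_freq[key] for key in kept if key[2] == cat}
--             for cat in ('hate', 'offn', 'clean')}
-- ===== Notes on version B (the rewrite author's own statement) =====
-- stated objective: simpler
-- what changed: B is staged: one filtering pass collects the tag-matching keys, then each category's dict is built by its own comprehension scan over that filtered list, replacing A's single loop with three mutable accumulator dicts and an if/elif dispatch chain.
import Mathlib
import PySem

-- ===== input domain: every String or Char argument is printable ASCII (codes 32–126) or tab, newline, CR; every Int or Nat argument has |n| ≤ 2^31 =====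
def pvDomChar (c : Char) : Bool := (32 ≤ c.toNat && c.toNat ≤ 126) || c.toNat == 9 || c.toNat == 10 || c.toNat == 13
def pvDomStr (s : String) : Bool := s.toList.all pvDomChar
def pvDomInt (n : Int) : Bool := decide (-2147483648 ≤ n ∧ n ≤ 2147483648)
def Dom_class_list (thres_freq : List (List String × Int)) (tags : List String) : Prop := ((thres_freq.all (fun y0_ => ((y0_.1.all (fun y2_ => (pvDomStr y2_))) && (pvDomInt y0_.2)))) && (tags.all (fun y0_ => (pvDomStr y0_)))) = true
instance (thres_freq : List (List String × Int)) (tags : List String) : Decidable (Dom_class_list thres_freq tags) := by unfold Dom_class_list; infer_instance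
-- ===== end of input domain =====

-- B is staged: first filter the tag-matching keys, then build each category's dict by its
-- own scan over the filtered list, instead of A's single loop with three accumulator dicts
-- and an if/elif dispatch chain (objective: simpler).

-- ===== PORT A =====
-- thres_freq[key]: first-match lookup in the association list standing for the dict
def pvLookupA (thres_freq : List (List String × Int)) (key : List String) : Option Int :=
  (thres_freq.find? (fun p => p.1 == key)).map (·.2)

def pvStepA (f : List String → Option Int) (tags : List String)
    (acc : PySem.Dict String Int × PySem.Dict String Int × PySem.Dict String Int)
    (key : List String) : PySem.Dict String Int × PySem.Dict String Int × PySem.Dict String Int :=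
  match PySem.List.pyGet? key 1 with
  | none => acc  -- IndexError on key[1]; excluded by Pre_
  | some t1 =>
    if tags.contains t1 then
      match PySem.List.pyGet? key 2 with
      | none => acc  -- IndexError on key[2]; excluded by Pre_
      | some t2 =>
        if t2 == "clean" then
          match PySem.List.pyGet? key 0, f key with
          | some k0, some v => (acc.1, acc.2.1, acc.2.2.insert k0 v)
          | _, _ => acc
        else if t2 == "offn" then
          match PySem.List.pyGet? key 0, f key with
          | some k0, some v => (acc.1, acc.2.1.insert k0 v, acc.2.2)
          | _, _ => acc
        else if t2 == "hate" then
          match PySem.List.pyGet? key 0, f key with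
          | some k0, some v => (acc.1.insert k0 v, acc.2.1, acc.2.2)
          | _, _ => acc
        else acc
    else acc

def class_list (thres_freq : List (List String × Int)) (tags : List String) : List (String × List (String × Int)) :=
  let r := (thres_freq.map Prod.fst).foldl (pvStepA (pvLookupA thres_freq) tags)
    (PySem.Dict.empty, PySem.Dict.empty, PySem.Dict.empty)
  [("hate", r.1.items), ("offn", r.2.1.items), ("clean", r.2.2.items)]

-- ===== PORT B =====
-- kept = [key for key in thres_freq if key[1] in tags]
def pvKept (thres_freq : List (List String × Int)) (tags : List String) : List (List String) :=
  (thres_freq.map Prod.fst).filter (fun k => ((PySem.List.pyGet? k 1).map tags.contains).getD false)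

-- one step of the per-category dict comprehension {key[0]: thres_freq[key] for key in kept if key[2] == cat}
def pvStepC (f : List String → Option Int) (cat : String)
    (d : PySem.Dict String Int) (k : List String) : PySem.Dict String Int :=
  match PySem.List.pyGet? k 2 with
  | none => d  -- IndexError on key[2]; excluded by Pre_
  | some t2 =>
    if t2 == cat then
      match PySem.List.pyGet? k 0, f k with
      | some k0, some v => d.insert k0 v
      | _, _ => d
    else d

def class_list_alt (thres_freq : List (List String × Int)) (tags : List String) : List (String × List (String × Int)) :=
  let kept := pvKept thres_freq tags
  [("hate", (kept.foldl (pvStepC (pvLookupA thres_freq) "hate") PySem.Dict.empty).items),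
   ("offn", (kept.foldl (pvStepC (pvLookupA thres_freq) "offn") PySem.Dict.empty).items),
   ("clean", (kept.foldl (pvStepC (pvLookupA thres_freq) "clean") PySem.Dict.empty).items)]

-- ===== PRECONDITION & SPEC =====
-- Pre_ excludes association lists with duplicate keys (a Python dict, which this list stands
-- for, cannot contain them) and keys too short to index, on which A raises IndexError.
def Pre_class_list (thres_freq : List (List String × Int)) (tags : List String) : Prop :=
  (thres_freq.map Prod.fst).Nodup ∧
  ∀ p ∈ thres_freq, 2 ≤ p.1.length ∧ (p.1.getD 1 "" ∈ tags → 3 ≤ p.1.length)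

instance (thres_freq : List (List String × Int)) (tags : List String) : Decidable (Pre_class_list thres_freq tags) := by unfold Pre_class_list; infer_instance

def pvWitness_class_list : (List (List String × Int)) × List String :=
  ([(["a", "t", "hate"], 1), (["b", "t", "clean"], 2)], ["t"])

def Spec_class_list (thres_freq : List (List String × Int)) (tags : List String) (out : List (String × List (String × Int))) : Prop := out = class_list_alt thres_freq tags
instance (thres_freq : List (List String × Int)) (tags : List String) (out : List (String × List (String × Int))) : Decidable (Spec_class_list thres_freq tags out) := by unfold Spec_class_list; infer_instance

-- ===== CLAIM (what is proved, stated in full; the proofs are below) =====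
def Claim_equal_class_list : Prop := ∀ (thres_freq : List (List String × Int)) (tags : List String), Dom_class_list thres_freq tags → Pre_class_list thres_freq tags → Spec_class_list thres_freq tags (class_list thres_freq tags)

-- ===== LEMMAS AND PROOFS =====

-- A's single fold over all keys equals the three per-category folds over the filtered keys
theorem pvSplit (f : List String → Option Int) (tags : List String) :
    ∀ (ks : List (List String)) (h o c : PySem.Dict String Int),
      ks.foldl (pvStepA f tags) (h, o, c) =
        ((ks.filter (fun k => ((PySem.List.pyGet? k 1).map tags.contains).getD false)).foldl (pvStepC f "hate") h,
         (ks.filter (fun k => ((PySem.List.pyGet? k 1).map tags.contains).getD false)).foldl (pvStepC f "offn") o,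
         (ks.filter (fun k => ((PySem.List.pyGet? k 1).map tags.contains).getD false)).foldl (pvStepC f "clean") c) := by
  intro ks
  induction ks with
  | nil => intro h o c; rfl
  | cons k t ih =>
    intro h o c
    simp only [List.foldl_cons, List.filter_cons]
    cases hg1 : PySem.List.pyGet? k 1 with
    | none => simpa [pvStepA, hg1] using ih h o c
    | some t1 =>
      by_cases htag : t1 ∈ tags
      · have hc : tags.contains t1 = true := by simpa using htag
        simp only [Option.map_some, Option.getD_some, List.contains_eq_mem,
          decide_eq_true_eq, htag, if_true, List.foldl_cons]
        rw [show pvStepA f tags (h, o, c) k =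
            (pvStepC f "hate" h k, pvStepC f "offn" o k, pvStepC f "clean" c k) from ?_]
        · exact ih _ _ _
        · unfold pvStepA pvStepC
          simp only [hg1, hc, if_true]
          cases hg2 : PySem.List.pyGet? k 2 with
          | none => rfl
          | some t2 =>
            by_cases h1 : t2 = "clean"
            · subst h1; cases PySem.List.pyGet? k 0 <;> cases f k <;> simp
            · by_cases h2 : t2 = "offn"
              · subst h2; cases PySem.List.pyGet? k 0 <;> cases f k <;> simp
              · by_cases h3 : t2 = "hate"
                · subst h3; cases PySem.List.pyGet? k 0 <;> cases f k <;> simp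
                · simp [h1, h2, h3]
      · have hc : tags.contains t1 = false := by simpa using htag
        simpa [pvStepA, hg1, hc, htag] using ih h o c

-- ===== VERDICT (by name: the statement is the Claim_ definition above) =====
theorem class_list_spec : Claim_equal_class_list := by
  intro thres_freq tags _hdom _hpre
  unfold Spec_class_list class_list class_list_alt pvKept
  rw [pvSplit (pvLookupA thres_freq) tags (thres_freq.map Prod.fst)
    PySem.Dict.empty PySem.Dict.empty PySem.Dict.empty]
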